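-- pv_equiv track=rewrite | github.com/WhitecrowAurora/lora-rescripts | mikazuki/utils/runtime_import_guards.py | _is_blocked_module_name
-- ===== SOURCE A (Python) =====
-- _BLOCKED_EXPERIMENTAL_MODULE_PREFIXES = (
--     "bitsandbytes",
--     "pytorch_optimizer",
-- )
--
-- def _is_blocked_module_name(name: str) -> bool:
--     normalized = str(name or "").strip()
--     if not normalized:
--         return False
--     for prefix in _BLOCKED_EXPERIMENTAL_MODULE_PREFIXES:
--         if normalized == prefix or normalized.startswith(prefix + "."):
--             return True
--     return False
-- ===== SOURCE B (Python) =====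
-- _BLOCKED_EXPERIMENTAL_MODULE_PREFIXES = (
--     "bitsandbytes",
--     "pytorch_optimizer",
-- )
--
-- _BLOCKED_SET = set(_BLOCKED_EXPERIMENTAL_MODULE_PREFIXES)
--
-- def _is_blocked_module_name(name: str) -> bool:
--     normalized = str(name or "").strip()
--     if not normalized:
--         return False
--     root = normalized.split(".", 1)[0]
--     return root in _BLOCKED_SET
-- ===== Notes on version B (the rewrite author's own statement) =====
-- stated objective: idiomatic
-- what changed: Replaces the per-prefix scan with == / startswith tests by extracting the top-level package once (split at the first dot) and a single set membership test.
import Mathlib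
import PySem

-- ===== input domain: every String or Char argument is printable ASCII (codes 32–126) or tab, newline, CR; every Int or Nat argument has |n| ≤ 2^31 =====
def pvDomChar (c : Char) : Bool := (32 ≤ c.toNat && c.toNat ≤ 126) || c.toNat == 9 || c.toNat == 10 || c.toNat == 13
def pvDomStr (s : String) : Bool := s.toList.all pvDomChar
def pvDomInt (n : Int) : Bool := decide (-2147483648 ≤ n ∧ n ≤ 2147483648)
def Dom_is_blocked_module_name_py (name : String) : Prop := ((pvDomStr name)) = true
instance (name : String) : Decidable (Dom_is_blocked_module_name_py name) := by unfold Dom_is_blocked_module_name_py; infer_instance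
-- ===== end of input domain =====

-- B replaces A's per-prefix == / startswith scan by extracting the top-level package
-- once (split at the first dot) and testing membership of that root in a set (more idiomatic).


-- ===== PORT A =====
def blockedPrefixesA : List String := ["bitsandbytes", "pytorch_optimizer"]

def is_blocked_module_name_py (name : String) : Bool :=
  let normalized := PySem.Str.strip name
  if normalized = "" then false
  else blockedPrefixesA.any (fun prefix_ =>
    normalized == prefix_ || PySem.Str.startswith normalized (prefix_ ++ "."))

-- ===== PORT B =====
def blockedSetB : PySem.Set String := PySem.Set.ofList ["bitsandbytes", "pytorch_optimizer"]

def is_blocked_module_name_py_alt (name : String) : Bool :=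
  let normalized := PySem.Str.strip name
  if normalized = "" then false
  else
    let root := ((PySem.Str.splitMax? normalized "." 1).getD []).headD ""
    blockedSetB.contains root

-- ===== PRECONDITION & SPEC =====
def Spec_is_blocked_module_name_py (name : String) (out : Bool) : Prop := out = is_blocked_module_name_py_alt name
instance (name : String) (out : Bool) : Decidable (Spec_is_blocked_module_name_py name out) := by unfold Spec_is_blocked_module_name_py; infer_instance

-- ===== CLAIM (what is proved, stated in full; the proofs are below) =====
def Claim_equal_is_blocked_module_name_py : Prop := ∀ (name : String), Dom_is_blocked_module_name_py name → Spec_is_blocked_module_name_py name (is_blocked_module_name_py name)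

-- ===== LEMMAS AND PROOFS =====

theorem go_zero_head (sep : List Char) (fuel : Nat) (l cur r : List Char) :
    (PySem.Chars.splitOnMax.go sep fuel 0 l cur [r]).head? = some r := by
  cases fuel <;> cases l <;> simp [PySem.Chars.splitOnMax.go]

theorem go_one_head (fuel : Nat) (l cur : List Char) (h : l.length < fuel) :
    (PySem.Chars.splitOnMax.go ['.'] fuel 1 l cur []).head? =
      some (cur.reverse ++ l.takeWhile (· ≠ '.')) := by
  induction fuel generalizing l cur with
  | zero => omega
  | succ n ih =>
    cases l with
    | nil => simp [PySem.Chars.splitOnMax.go]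
    | cons c rest =>
      by_cases hc : c = '.'
      · subst hc
        simp [PySem.Chars.splitOnMax.go, List.isPrefixOf, go_zero_head]
      · have hpre : List.isPrefixOf ['.'] (c :: rest) = false := by
          simp [List.isPrefixOf]; exact fun h' => hc h'.symm
        have step : PySem.Chars.splitOnMax.go ['.'] (n+1) 1 (c :: rest) cur [] =
            PySem.Chars.splitOnMax.go ['.'] n 1 rest (c :: cur) [] := by
          simp [PySem.Chars.splitOnMax.go, hpre]
        rw [step, ih rest (c :: cur) (by simpa using Nat.lt_of_succ_lt_succ h)]
        simp [hc]

theorem root_eq (s : String) :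
    ((PySem.Str.splitMax? s "." 1).getD []).headD "" =
      String.ofList (s.toList.takeWhile (· ≠ '.')) := by
  have hsplit : PySem.Chars.splitMax? s.toList ['.'] 1 =
      some (PySem.Chars.splitOnMax s.toList ['.'] 1) := by
    simp [PySem.Chars.splitMax?]
  have hgo : PySem.Chars.splitOnMax s.toList ['.'] 1 =
      PySem.Chars.splitOnMax.go ['.'] (s.toList.length + 1) 1 s.toList [] [] := by
    simp [PySem.Chars.splitOnMax]
  have hh := go_one_head (s.toList.length + 1) s.toList [] (by omega)
  simp only [PySem.Str.splitMax?]
  rw [show (".":String).toList = ['.'] from rfl, hsplit, hgo]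
  simp only [String.length_toList] at hh
  simp [hh]

theorem takeWhile_dot_eq (p cs : List Char) (hp : '.' ∉ p) :
    (cs.takeWhile (· ≠ '.') = p) ↔ (cs = p ∨ (p ++ ['.']) <+: cs) := by
  constructor
  · intro h
    have hsplit : cs = cs.takeWhile (· ≠ '.') ++ cs.dropWhile (· ≠ '.') :=
      (List.takeWhile_append_dropWhile).symm
    rcases hd : cs.dropWhile (· ≠ '.') with _ | ⟨c, t⟩
    · left; rw [hsplit, hd, h]; simp
    · have hc : c = '.' := by
        have := List.head_dropWhile_not (p := fun c => decide (c ≠ '.')) (l := cs)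
        simp only [hd] at this
        simpa using this (by simp)
      right
      refine ⟨t, ?_⟩
      rw [hsplit, hd, h, hc]; simp
  · rintro (rfl | ⟨t, rfl⟩)
    · exact List.takeWhile_eq_self_iff.mpr (by intro c hc; simp; rintro rfl; exact hp hc)
    · rw [List.append_assoc]
      rw [List.takeWhile_append_of_pos (by intro c hc; simp; rintro rfl; exact hp hc)]
      simp

theorem prefix_test (s : String) (p : String) (hp : '.' ∉ p.toList) :
    (s == p || PySem.Str.startswith s (p ++ ".")) =
      ((s.toList.takeWhile (· ≠ '.')) == p.toList) := by
  apply Bool.eq_iff_iff.mpr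
  have h2 : PySem.Str.startswith s (p ++ ".") =
      PySem.Chars.startswith s.toList (p.toList ++ ['.']) := by
    simp
  simp only [Bool.or_eq_true, beq_iff_eq, h2, PySem.Chars.startswith_iff]
  rw [takeWhile_dot_eq p.toList s.toList hp]
  constructor
  · rintro (rfl | h) ; exact Or.inl rfl; exact Or.inr h
  · rintro (h | h)
    · left; exact String.ext h
    · right; exact h

-- ===== VERDICT (by name: the statement is the Claim_ definition above) =====
theorem is_blocked_module_name_py_spec : Claim_equal_is_blocked_module_name_py := by
  intro name _
  unfold Spec_is_blocked_module_name_py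

  unfold is_blocked_module_name_py is_blocked_module_name_py_alt
  set s := PySem.Str.strip name with hs
  by_cases h0 : s = ""
  · simp [h0]
  · simp only [h0, if_false]
    rw [root_eq s]
    have he : ∀ q : String, (String.ofList (s.toList.takeWhile (· ≠ '.')) == q)
        = ((s.toList.takeWhile (· ≠ '.')) == q.toList) := by
      intro q
      apply Bool.eq_iff_iff.mpr
      simp [String.ext_iff]
    show (blockedPrefixesA.any fun prefix_ =>
        s == prefix_ || PySem.Str.startswith s (prefix_ ++ ".")) =
      blockedSetB.contains (String.ofList (s.toList.takeWhile (· ≠ '.')))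
    have hset : blockedSetB = ["bitsandbytes", "pytorch_optimizer"] := rfl
    rw [hset]
    simp only [blockedPrefixesA, List.any_cons, List.any_nil, Bool.or_false]
    rw [prefix_test s "bitsandbytes" (by decide), prefix_test s "pytorch_optimizer" (by decide)]
    simp only [PySem.Set.contains, List.contains_cons, List.contains_nil, Bool.or_false,
      he "bitsandbytes", he "pytorch_optimizer"]
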